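-- pv_equiv track=rewrite | github.com/whubsch/atlus | src/atlus/atlus.py | _combine_consecutive_tuples
-- ===== SOURCE A (Python) =====
-- def _combine_consecutive_tuples(
--     tuples_list: list[tuple[str, str]],
-- ) -> list[tuple[str, str]]:
--     """Join adjacent `usaddress` fields."""
--     combined_list = []
--     current_tag = None
--     current_value = None
--
--     for value, tag in tuples_list:
--         if tag != current_tag:
--             if current_tag:
--                 combined_list.append((current_value, current_tag))
--             current_value, current_tag = value, tag
--         else:
--             current_value = " ".join(i for i in [current_value, value] if i)
--
--     if current_tag:
--         combined_list.append((current_value, current_tag))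
--
--     return combined_list
-- ===== SOURCE B (Python) =====
-- def _combine_consecutive_tuples(
--     tuples_list: list[tuple[str, str]],
-- ) -> list[tuple[str, str]]:
--     """Join adjacent `usaddress` fields (run-scan re-implementation)."""
--     combined_list = []
--     i = 0
--     n = len(tuples_list)
--     while i < n:
--         tag = tuples_list[i][1]
--         j = i + 1
--         while j < n and tuples_list[j][1] == tag:
--             j += 1
--         if tag:
--             combined_list.append(
--                 (" ".join(v for v, _ in tuples_list[i:j] if v), tag)
--             )
--         i = j
--     return combined_list
-- ===== Notes on version B (the rewrite author's own statement) =====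
-- stated objective: alternative
-- what changed: Replaced the current_tag/current_value accumulator-and-flush state machine by a two-pointer run scanner: each maximal run of equal tags is located first, then reduced at once by joining its non-empty values.
import Mathlib
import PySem

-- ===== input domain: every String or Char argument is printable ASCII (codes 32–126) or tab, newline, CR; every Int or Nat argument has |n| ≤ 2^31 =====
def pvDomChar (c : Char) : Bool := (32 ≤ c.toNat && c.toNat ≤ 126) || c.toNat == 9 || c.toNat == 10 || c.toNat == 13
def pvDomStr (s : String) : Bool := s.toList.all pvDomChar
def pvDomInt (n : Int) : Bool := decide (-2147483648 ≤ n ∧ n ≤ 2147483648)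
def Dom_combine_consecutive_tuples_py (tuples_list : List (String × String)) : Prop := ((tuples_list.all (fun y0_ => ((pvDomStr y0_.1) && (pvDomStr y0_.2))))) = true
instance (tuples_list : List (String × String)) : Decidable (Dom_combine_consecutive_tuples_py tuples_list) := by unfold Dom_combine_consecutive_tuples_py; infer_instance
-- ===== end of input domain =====

-- B replaces A's accumulator-and-flush state machine by a two-pointer run scanner (same cost, alternative algorithm).

-- ===== PORT A =====
-- `current_value, current_tag` are always None together / set together, so the state is one Option pair.
def aFlush : Option (String × String) → List (String × String)
  | some (v, t) => if t ≠ "" then [(v, t)] else []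
  | none => []

-- " ".join(i for i in [current_value, value] if i)
def aJoin (cv v : String) : String := PySem.Str.join " " (([cv, v]).filter (fun s => s ≠ ""))

def aLoop : List (String × String) → List (String × String) → Option (String × String) → List (String × String)
  | [], acc, cur => acc ++ aFlush cur
  | (v, t) :: rest, acc, cur =>
    if (cur.map Prod.snd) ≠ some t then
      aLoop rest (acc ++ aFlush cur) (some (v, t))
    else
      aLoop rest acc (cur.map (fun p => (aJoin p.1 v, p.2)))

def combine_consecutive_tuples_py (tuples_list : List (String × String)) : List (String × String) :=
  aLoop tuples_list [] none

-- ===== PORT B =====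
-- outer while: peel one maximal run (inner while = takeWhile/dropWhile on the same tag), emit its joined non-empty values
def combine_consecutive_tuples_py_alt (tuples_list : List (String × String)) : List (String × String) :=
  match tuples_list with
  | [] => []
  | (v, t) :: rest =>
    (if t ≠ "" then
        [(PySem.Str.join " " ((v :: (rest.takeWhile (fun p => p.2 == t)).map Prod.fst).filter (fun s => s ≠ "")), t)]
      else [])
      ++ combine_consecutive_tuples_py_alt (rest.dropWhile (fun p => p.2 == t))
termination_by tuples_list.length
decreasing_by simpa using Nat.lt_succ_of_le (List.length_dropWhile_le _ _)

-- ===== PRECONDITION & SPEC =====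
def Spec_combine_consecutive_tuples_py (tuples_list : List (String × String)) (out : List (String × String)) : Prop := out = combine_consecutive_tuples_py_alt tuples_list
instance (tuples_list : List (String × String)) (out : List (String × String)) : Decidable (Spec_combine_consecutive_tuples_py tuples_list out) := by unfold Spec_combine_consecutive_tuples_py; infer_instance

-- ===== CLAIM (what is proved, stated in full; the proofs are below) =====
def Claim_equal_combine_consecutive_tuples_py : Prop := ∀ (tuples_list : List (String × String)), Dom_combine_consecutive_tuples_py tuples_list → Spec_combine_consecutive_tuples_py tuples_list (combine_consecutive_tuples_py tuples_list)

-- ===== LEMMAS AND PROOFS =====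
theorem str_ext {s t : String} (h : s.toList = t.toList) : s = t := by
  have := congrArg String.ofList h
  simpa using this

theorem join_nil' : PySem.Str.join " " ([] : List String) = "" := by
  apply str_ext; simp [PySem.Str.toList_join, PySem.Chars.join_nil]

theorem join_single (x : String) : PySem.Str.join " " [x] = x := by
  apply str_ext; simp [PySem.Str.toList_join, PySem.Chars.join_singleton]

theorem join_cc (a b : String) (L : List String) :
    PySem.Str.join " " (a :: b :: L) = a ++ " " ++ PySem.Str.join " " (b :: L) := by
  apply str_ext
  simp [PySem.Str.toList_join, PySem.Chars.join_cons_cons, List.append_assoc]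

theorem append_ne_empty {a : String} (b : String) (ha : a ≠ "") : a ++ b ≠ "" := by
  intro h
  have h2 : a.toList ++ b.toList = ([] : List Char) := by
    have := congrArg String.toList h
    simpa using this
  rcases List.append_eq_nil_iff.mp h2 with ⟨h3, _⟩
  exact ha (str_ext (by simpa using h3))

theorem aJoin_left_empty (x : String) : aJoin "" x = (if x = "" then "" else x) := by
  by_cases hx : x = ""
  · subst hx; simp [aJoin, join_nil']
  · simp [aJoin, hx, join_single]

theorem aJoin_right_empty (v : String) : aJoin v "" = (if v = "" then "" else v) := by
  by_cases hv : v = ""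
  · subst hv; simp [aJoin, join_nil']
  · simp [aJoin, hv, join_single]

theorem aJoin_both (v x : String) (hv : v ≠ "") (hx : x ≠ "") : aJoin v x = v ++ " " ++ x := by
  simp [aJoin, hv, hx, join_cc, join_single]

theorem join_merge (a b : String) (L : List String) (ha : a ≠ "") (hb : b ≠ "") :
    PySem.Str.join " " ((a ++ " " ++ b) :: L) = PySem.Str.join " " (a :: b :: L) := by
  cases L with
  | nil => rw [join_single, join_cc, join_single]
  | cons c L' =>
      rw [join_cc, join_cc, join_cc]
      apply str_ext
      simp [List.append_assoc]

theorem join_fold (vs : List String) : ∀ v : String,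
    vs.foldl aJoin v = PySem.Str.join " " ((v :: vs).filter (fun s => s ≠ "")) := by
  induction vs with
  | nil =>
      intro v
      by_cases hv : v = ""
      · subst hv; simp [join_nil']
      · simp [hv, join_single]
  | cons x rest ih =>
      intro v
      simp only [List.foldl_cons]
      rw [ih (aJoin v x)]
      by_cases hv : v = ""
      · subst hv
        rw [aJoin_left_empty]
        by_cases hx : x = "" <;> simp [hx]
      · by_cases hx : x = ""
        · subst hx
          rw [aJoin_right_empty]
          simp [hv]
        · rw [aJoin_both v x hv hx]
          have hne : (v ++ " " ++ x) ≠ "" := append_ne_empty x (append_ne_empty " " hv)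
          rw [List.filter_cons_of_pos (by simpa using hne),
              List.filter_cons_of_pos (by simpa using hv),
              List.filter_cons_of_pos (by simpa using hx),
              join_merge v x _ hv hx]

theorem run_lemma (t : String) (run : List (String × String)) :
    ∀ more acc cv, (∀ p ∈ run, p.2 = t) →
      aLoop (run ++ more) acc (some (cv, t)) =
        aLoop more acc (some ((run.map Prod.fst).foldl aJoin cv, t)) := by
  induction run with
  | nil => intro more acc cv _; simp
  | cons p run' ih =>
      intro more acc cv hall
      obtain ⟨pv, pt⟩ := p
      have hpt : pt = t := hall (pv, pt) (by simp)
      subst hpt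
      have := ih more acc (aJoin cv pv) (fun q hq => hall q (by simp [hq]))
      simpa [aLoop] using this

def headOK : Option (String × String) → List (String × String) → Prop
  | some c, p :: _ => p.2 ≠ c.2
  | _, _ => True

theorem dropWhile_head_false {α : Type} (p : α → Bool) (l : List α) :
    ∀ x xs, l.dropWhile p = x :: xs → p x = false := by
  induction l with
  | nil => intro x xs h; simp at h
  | cons a l' ih =>
      intro x xs h
      by_cases hpa : p a = true
      · rw [List.dropWhile_cons_of_pos hpa] at h
        exact ih x xs h
      · rw [List.dropWhile_cons_of_neg hpa] at h
        cases h
        simpa using hpa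

theorem main_lemma (n : Nat) : ∀ l : List (String × String), l.length ≤ n → ∀ acc cur, headOK cur l →
    aLoop l acc cur = (acc ++ aFlush cur) ++ combine_consecutive_tuples_py_alt l := by
  induction n with
  | zero =>
      intro l hl acc cur _
      have : l = [] := List.eq_nil_of_length_eq_zero (Nat.le_zero.mp hl)
      subst this
      simp [aLoop, combine_consecutive_tuples_py_alt]
  | succ n ih =>
      intro l hl acc cur hok
      cases l with
      | nil => simp [aLoop, combine_consecutive_tuples_py_alt]
      | cons hd rest =>
          obtain ⟨v, t⟩ := hd
          have hcond : (cur.map Prod.snd) ≠ some t := by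
            cases cur with
            | none => simp
            | some c =>
                simp only [Option.map_some, ne_eq, Option.some.injEq]
                exact fun h => (hok : t ≠ c.2) h.symm
          have hstep : aLoop ((v, t) :: rest) acc cur
              = aLoop rest (acc ++ aFlush cur) (some (v, t)) := by
            simp [aLoop, hcond]
          set p : String × String → Bool := fun q => q.2 == t with hp
          have hsplit : rest.takeWhile p ++ rest.dropWhile p = rest := List.takeWhile_append_dropWhile
          have hrun : ∀ q ∈ rest.takeWhile p, q.2 = t := by
            intro q hq
            have := List.mem_takeWhile_imp hq
            simpa [hp] using this
          have hmore : headOK (some ((((rest.takeWhile p).map Prod.fst).foldl aJoin v), t)) (rest.dropWhile p) := by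
            cases hmr : rest.dropWhile p with
            | nil => trivial
            | cons x xs =>
                have := dropWhile_head_false p rest x xs hmr
                simpa [hp, headOK] using this
          have hlen : (rest.dropWhile p).length ≤ n := by
            have h1 : (rest.dropWhile p).length ≤ rest.length := List.length_dropWhile_le _ _
            have h2 : rest.length ≤ n := by simpa using Nat.le_of_succ_le_succ hl
            exact le_trans h1 h2
          rw [hstep]
          conv_lhs => rw [← hsplit]
          rw [run_lemma t (rest.takeWhile p) (rest.dropWhile p) (acc ++ aFlush cur) v hrun]
          rw [ih (rest.dropWhile p) hlen (acc ++ aFlush cur) _ hmore]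
          rw [combine_consecutive_tuples_py_alt]
          rw [join_fold]
          simp only [hp]
          simp [aFlush, List.append_assoc]

-- ===== VERDICT (by name: the statement is the Claim_ definition above) =====
theorem combine_consecutive_tuples_py_spec : Claim_equal_combine_consecutive_tuples_py := by
  intro l _
  unfold Spec_combine_consecutive_tuples_py combine_consecutive_tuples_py
  have h := main_lemma l.length l le_rfl [] none (by cases l <;> trivial)
  simpa [aFlush] using h
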